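-- pv_equiv track=rewrite | github.com/dengkliu/algorithms | heaters.py | __find_nearest_heaters
-- ===== SOURCE A (Python) =====
-- def __find_nearest_heaters(house, heaters):
--     start, end = 0, len(heaters) - 1
--
--     while start + 1 < end:
--         mid = (start + end)//2
--         if heaters[mid] > house:
--             end = mid
--         else:
--             start = mid
--
--     distance_to_start = house - heaters[start]
--     distance_to_end = heaters[end] - house
--
--     return heaters[start] if distance_to_start < distance_to_end else heaters[end]
-- ===== SOURCE B (Python) =====
-- def __find_nearest_heaters(house, heaters):
--     if len(heaters) <= 2:
--         lo, hi = heaters[0], heaters[-1]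
--         return lo if house - lo < hi - house else hi
--     m = (len(heaters) - 1) // 2
--     if heaters[m] > house:
--         return __find_nearest_heaters(house, heaters[:m + 1])
--     return __find_nearest_heaters(house, heaters[m:])
-- ===== Notes on version B (the rewrite author's own statement) =====
-- stated objective: alternative
-- what changed: B recurses structurally on sliced sublists (heaters[:m+1] / heaters[m:]) with the midpoint taken relative to the current window, instead of A's iterative while-loop maintaining a start/end index pair into the full list; the endpoint comparison becomes the recursion's base case.
import Mathlib
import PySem

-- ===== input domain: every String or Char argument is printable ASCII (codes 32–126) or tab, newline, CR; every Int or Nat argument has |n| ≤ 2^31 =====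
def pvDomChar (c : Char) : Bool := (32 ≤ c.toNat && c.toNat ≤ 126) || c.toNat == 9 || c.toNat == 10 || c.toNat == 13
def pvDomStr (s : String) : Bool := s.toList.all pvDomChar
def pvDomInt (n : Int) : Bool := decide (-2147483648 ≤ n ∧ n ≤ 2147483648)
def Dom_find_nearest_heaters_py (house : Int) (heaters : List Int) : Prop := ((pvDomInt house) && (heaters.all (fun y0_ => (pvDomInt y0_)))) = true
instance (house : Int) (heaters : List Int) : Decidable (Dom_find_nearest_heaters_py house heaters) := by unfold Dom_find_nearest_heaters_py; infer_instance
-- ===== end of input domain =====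

-- B recurses on sliced sublists with a window-relative midpoint instead of A's iterative
-- start/end index loop (objective: alternative decomposition); equal on nonempty lists (Pre_).

-- ===== PORT A =====
-- Python's while-loop, transliterated with a fuel guard ≥ the number of iterations
-- (fuel only makes the recursion total; with the fuel passed below it never runs out).
def faLoop (house : Int) (heaters : List Int) : Nat → Int → Int → Int × Int
  | 0, s, e => (s, e)
  | fuel + 1, s, e =>
    if s + 1 < e then
      let mid := PySem.Int.floordiv (s + e) 2
      if house < (PySem.List.pyGet? heaters mid).getD 0 then
        faLoop house heaters fuel s mid
      else
        faLoop house heaters fuel mid e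
    else (s, e)

-- the three lines after the loop: heaters[start] / heaters[end] via pyGet? with .getD 0
-- (out of range only when Python raises IndexError on the empty list, outside Pre_).
def faFinish (house : Int) (heaters : List Int) (p : Int × Int) : Int :=
  let hs := (PySem.List.pyGet? heaters p.1).getD 0
  let he := (PySem.List.pyGet? heaters p.2).getD 0
  let distance_to_start := house - hs
  let distance_to_end := he - house
  if distance_to_start < distance_to_end then hs else he

def find_nearest_heaters_py (house : Int) (heaters : List Int) : Int :=
  faFinish house heaters (faLoop house heaters heaters.length 0 ((heaters.length : Int) - 1))

-- ===== PORT B =====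
-- heaters[0] / heaters[-1] via pyGet? with .getD 0 (out of range only when Python raises
-- IndexError on the empty list, outside Pre_); heaters[:m+1] / heaters[m:] via PySem slices.
def find_nearest_heaters_py_alt (house : Int) (heaters : List Int) : Int :=
  if _h : heaters.length ≤ 2 then
    let lo := (PySem.List.pyGet? heaters 0).getD 0
    let hi := (PySem.List.pyGet? heaters (-1)).getD 0
    if house - lo < hi - house then lo else hi
  else
    let m := PySem.Int.floordiv ((heaters.length : Int) - 1) 2
    if house < (PySem.List.pyGet? heaters m).getD 0 then
      find_nearest_heaters_py_alt house (PySem.List.slice heaters none (some (m + 1)))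
    else
      find_nearest_heaters_py_alt house (PySem.List.slice heaters (some m) none)
termination_by heaters.length
decreasing_by
  all_goals
    have hm : PySem.Int.floordiv ((heaters.length : Int) - 1) 2 = (((heaters.length - 1) / 2 : Nat) : Int) := by
      have h4 : ((heaters.length : Int) - 1) = (((heaters.length - 1 : Nat)) : Int) := by omega
      rw [h4]
      exact_mod_cast PySem.Int.floordiv_natCast (heaters.length - 1) 2
  · rw [hm, show ((((heaters.length - 1) / 2 : Nat)) : Int) + 1 = (((heaters.length - 1) / 2 + 1 : Nat) : Int) by push_cast; ring,
      PySem.List.slice_to_natCast]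
    simp only [List.length_take]
    omega
  · rw [hm, PySem.List.slice_from_natCast]
    simp only [List.length_drop]
    omega

-- ===== PRECONDITION & SPEC =====
-- Pre_ excludes only the empty list, on which Python A (heaters[start]) and Python B
-- (heaters[0]) both raise IndexError.
def Pre_find_nearest_heaters_py (house : Int) (heaters : List Int) : Prop := heaters ≠ []
instance (house : Int) (heaters : List Int) : Decidable (Pre_find_nearest_heaters_py house heaters) := by
  unfold Pre_find_nearest_heaters_py; infer_instance

def pvWitness_find_nearest_heaters_py : Int × List Int := (7, [1, 4, 4, 9])

def Spec_find_nearest_heaters_py (house : Int) (heaters : List Int) (out : Int) : Prop := out = find_nearest_heaters_py_alt house heaters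
instance (house : Int) (heaters : List Int) (out : Int) : Decidable (Spec_find_nearest_heaters_py house heaters out) := by unfold Spec_find_nearest_heaters_py; infer_instance

-- ===== CLAIM (what is proved, stated in full; the proofs are below) =====
def Claim_equal_find_nearest_heaters_py : Prop := ∀ (house : Int) (heaters : List Int), Dom_find_nearest_heaters_py house heaters → Pre_find_nearest_heaters_py house heaters → Spec_find_nearest_heaters_py house heaters (find_nearest_heaters_py house heaters)

-- ===== LEMMAS AND PROOFS =====

theorem pyGetD_eq (heaters : List Int) (i : Int) (h0 : 0 ≤ i) (h1 : i < (heaters.length : Int)) :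
    (PySem.List.pyGet? heaters i).getD 0 = heaters[i.toNat]'(by omega) := by
  rw [PySem.List.pyGet?_eq_some_getElem heaters h0 h1]
  rfl

-- A's window heaters[s..e] as the list B recurses on
def win (heaters : List Int) (s e : Nat) : List Int := (heaters.drop s).take (e - s + 1)

theorem win_length (heaters : List Int) (s e : Nat) (hse : s ≤ e) (he : e < heaters.length) :
    (win heaters s e).length = e - s + 1 := by
  simp [win]
  omega

theorem win_get (heaters : List Int) (s e i : Nat) (hse : s ≤ e) (he : e < heaters.length)
    (hi : i ≤ e - s) :
    (win heaters s e)[i]'(by rw [win_length heaters s e hse he]; omega) = heaters[s + i]'(by omega) := by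
  simp [win]

-- the bridge: finishing A's loop from (s, e) computes B's recursion on the window heaters[s..e]
theorem bridge (house : Int) (heaters : List Int) (fuel s e : Nat)
    (hse : s ≤ e) (he : e < heaters.length) (hfuel : e - s ≤ fuel) :
    faFinish house heaters (faLoop house heaters fuel (s : Int) (e : Int)) =
      find_nearest_heaters_py_alt house (win heaters s e) := by
  induction fuel generalizing s e with
  | zero =>
    have hes : e = s := by omega
    subst hes
    have hlen : (win heaters e e).length = 1 := by rw [win_length heaters e e le_rfl he]; omega
    have h0 : (win heaters e e)[0]'(by omega) = heaters[e] := by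
      have := win_get heaters e e 0 le_rfl he (by omega)
      simpa using this
    rw [find_nearest_heaters_py_alt]
    rw [dif_pos (by omega : (win heaters e e).length ≤ 2)]
    have hlo : (PySem.List.pyGet? (win heaters e e) 0).getD 0 = heaters[e] := by
      rw [PySem.List.pyGet?_zero, List.getElem?_eq_getElem (by omega)]
      simpa using h0
    have hhi : (PySem.List.pyGet? (win heaters e e) (-1)).getD 0 = heaters[e] := by
      rw [PySem.List.pyGet?_neg_one, List.getLast?_eq_getElem?, hlen]
      norm_num
      rw [List.getElem?_eq_getElem (by omega)]
      simpa using h0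
    have hE : ((PySem.List.pyGet? heaters (e : Int)).getD 0) = heaters[e] := by
      rw [pyGetD_eq heaters (e : Int) (by omega) (by omega)]
      simp
    simp only [faLoop, faFinish]
    rw [hE, hlo, hhi]
  | succ n ih =>
    by_cases hlt : s + 1 < e
    · -- loop/recursion step
      have hILt : ((s : Int) + 1 < (e : Int)) := by omega
      have hmid : PySem.Int.floordiv ((s : Int) + (e : Int)) 2 = (((s + e) / 2 : Nat) : Int) := by
        rw [show ((s : Int) + (e : Int)) = (((s + e : Nat)) : Int) by push_cast; ring]
        exact_mod_cast PySem.Int.floordiv_natCast (s + e) 2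
      set mN : Nat := (s + e) / 2 with hmN
      have hm1 : s < mN := by omega
      have hm2 : mN < e := by omega
      have hwlen : (win heaters s e).length = e - s + 1 := win_length heaters s e hse he
      have hgm : (PySem.List.pyGet? heaters ((mN : Nat) : Int)).getD 0 = heaters[mN]'(by omega) := by
        rw [pyGetD_eq heaters (mN : Int) (by omega) (by omega)]
        simp
      -- B's window-relative midpoint is the same element
      have hrel : (e - s) / 2 = mN - s := by omega
      have hmW : PySem.Int.floordiv (((win heaters s e).length : Int) - 1) 2 = (((mN - s : Nat)) : Int) := by
        rw [hwlen, show (((e - s + 1 : Nat) : Int) - 1) = (((e - s : Nat)) : Int) by push_cast; ring, ← hrel]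
        exact_mod_cast PySem.Int.floordiv_natCast (e - s) 2
      have hgmW : (PySem.List.pyGet? (win heaters s e) (((mN - s : Nat)) : Int)).getD 0 = heaters[mN]'(by omega) := by
        rw [pyGetD_eq _ (((mN - s : Nat)) : Int) (by omega) (by rw [hwlen]; omega)]
        have := win_get heaters s e (mN - s) hse he (by omega)
        simpa [show s + (mN - s) = mN by omega] using this
      -- the two sliced windows
      have hleft : PySem.List.slice (win heaters s e) none (some ((((mN - s : Nat)) : Int) + 1)) = win heaters s mN := by
        rw [show ((((mN - s : Nat)) : Int) + 1) = (((mN - s + 1 : Nat)) : Int) by push_cast; ring,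
          PySem.List.slice_to_natCast]
        simp only [win, List.take_take]
        congr 1
        omega
      have hright : PySem.List.slice (win heaters s e) (some (((mN - s : Nat)) : Int)) none = win heaters mN e := by
        rw [PySem.List.slice_from_natCast]
        simp only [win, List.drop_take, List.drop_drop]
        congr 1
        · omega
        · congr 1
          omega
      -- unfold one step on each side
      rw [show n + 1 = n + 1 from rfl]
      simp only [faLoop, hILt, if_pos, hmid, hgm]
      rw [find_nearest_heaters_py_alt]
      rw [dif_neg (by rw [hwlen]; omega : ¬ (win heaters s e).length ≤ 2)]
      simp only [hmW, hgmW, hleft, hright]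
      by_cases hcmp : house < heaters[mN]'(by omega)
      · simp only [hcmp, if_pos]
        exact ih s mN (by omega) (by omega) (by omega)
      · simp only [hcmp, if_neg, not_false_iff]
        exact ih mN e (by omega) he (by omega)
    · -- loop exits; window has 1 or 2 elements
      have hwlen : (win heaters s e).length = e - s + 1 := win_length heaters s e hse he
      have hs' : (PySem.List.pyGet? heaters (s : Int)).getD 0 = heaters[s]'(by omega) := by
        rw [pyGetD_eq heaters (s : Int) (by omega) (by omega)]
        simp
      have he' : (PySem.List.pyGet? heaters (e : Int)).getD 0 = heaters[e] := by
        rw [pyGetD_eq heaters (e : Int) (by omega) (by omega)]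
        simp
      have hlo : (PySem.List.pyGet? (win heaters s e) 0).getD 0 = heaters[s]'(by omega) := by
        rw [pyGetD_eq _ 0 le_rfl (by rw [hwlen]; omega)]
        have := win_get heaters s e 0 hse he (by omega)
        simpa using this
      have hhi : (PySem.List.pyGet? (win heaters s e) (-1)).getD 0 = heaters[e] := by
        rw [PySem.List.pyGet?_neg_one, List.getLast?_eq_getElem?, hwlen]
        have := win_get heaters s e (e - s) hse he le_rfl
        simp only [show e - s + 1 - 1 = e - s from rfl]
        rw [List.getElem?_eq_getElem (by rw [hwlen]; omega)]
        simp [this, show s + (e - s) = e by omega]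
      have hnoLt : ¬ ((s : Int) + 1 < (e : Int)) := by omega
      simp only [faLoop, hnoLt, if_neg, not_false_iff, faFinish, hs', he']
      rw [find_nearest_heaters_py_alt]
      rw [dif_pos (by rw [hwlen]; omega : (win heaters s e).length ≤ 2)]
      simp only [hlo, hhi]

-- ===== VERDICT (by name: the statement is the Claim_ definition above) =====
theorem find_nearest_heaters_py_spec : Claim_equal_find_nearest_heaters_py := by
  intro house heaters _ hpre
  unfold Spec_find_nearest_heaters_py
  have hlen : 0 < heaters.length := List.length_pos_iff.mpr hpre
  have hcast : ((heaters.length : Int) - 1) = (((heaters.length - 1 : Nat)) : Int) := by omega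
  have hwin : win heaters 0 (heaters.length - 1) = heaters := by
    simp [win]
    omega
  have hb := bridge house heaters heaters.length 0 (heaters.length - 1) (by omega) (by omega) (by omega)
  rw [hwin] at hb
  unfold find_nearest_heaters_py
  rw [hcast]
  simpa using hb
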